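-- pv_equiv track=rewrite | github.com/Chaunecy/TransPCFG | monte-carlo.py | gen_guess_crack
-- ===== SOURCE A (Python) =====
-- import itertools
--
-- def gen_guess_crack(estimations: [int], upper_bound=10 ** 20):
--     guesses = [0]
--     cracked = [0]
--     estimations.sort()
--     for m, n in itertools.groupby(estimations):
--         if m <= upper_bound:
--             guesses.append(m)
--             cracked.append((cracked[-1]) + len(list(n)))
--     return guesses[1:], cracked[1:]
--     pass
-- ===== SOURCE B (Python) =====
-- import bisect
--
-- def gen_guess_crack(estimations: [int], upper_bound=10 ** 20):
--     estimations.sort()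
--     values = [m for m in dict.fromkeys(estimations) if m <= upper_bound]
--     return values, [bisect.bisect_right(estimations, m) for m in values]
-- ===== Notes on version B (the rewrite author's own statement) =====
-- stated objective: alternative
-- what changed: Replaces itertools.groupby with a running cumulative accumulator by reading each distinct value's cumulative cracked count directly as its bisect_right position in the sorted list (number of elements <= m), with the distinct values taken from dict.fromkeys.
import Mathlib
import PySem

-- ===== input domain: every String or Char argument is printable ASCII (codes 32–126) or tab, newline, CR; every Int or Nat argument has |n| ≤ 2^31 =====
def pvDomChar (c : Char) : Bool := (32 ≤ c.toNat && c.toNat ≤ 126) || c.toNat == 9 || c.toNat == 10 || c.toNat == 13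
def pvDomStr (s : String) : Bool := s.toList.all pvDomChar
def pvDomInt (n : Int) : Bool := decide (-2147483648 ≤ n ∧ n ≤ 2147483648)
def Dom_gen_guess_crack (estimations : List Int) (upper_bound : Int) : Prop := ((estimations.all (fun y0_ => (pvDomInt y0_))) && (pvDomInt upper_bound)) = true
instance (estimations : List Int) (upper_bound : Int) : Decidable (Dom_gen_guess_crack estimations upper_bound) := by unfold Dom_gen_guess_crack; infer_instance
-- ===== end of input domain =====

-- B replaces A's groupby-with-running-accumulator by reading each cumulative count directly as a
-- bisect_right position in the sorted list (objective: alternative). Both A and B sort `estimations`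
-- in place; the equivalence proved here is about the RETURN value.

-- ===== PORT A =====
-- itertools.groupby over the sorted list: consecutive runs as (key, group elements)
def pvRunsA : List Int → List (Int × List Int)
  | [] => []
  | x :: xs =>
      (x, x :: xs.takeWhile (fun y => y == x)) :: pvRunsA (xs.dropWhile (fun y => y == x))
  termination_by l => l.length
  decreasing_by
    simpa using Nat.lt_succ_of_le (List.length_dropWhile_le (fun y => y == x) xs)

def gen_guess_crack (estimations : List Int) (upper_bound : Int) : List Int × List Int :=
  let s := PySem.List.sorted estimations (fun x => x) false
  let r := (pvRunsA s).foldl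
    (fun (p : List Int × List Int) g =>
      if g.1 ≤ upper_bound then
        (p.1 ++ [g.1], p.2 ++ [PySem.List.pyGetD p.2 (-1) 0 + (g.2.length : Int)])
      else p)
    ([0], [0])
  (r.1.drop 1, r.2.drop 1)

-- ===== PORT B =====
def gen_guess_crack_alt (estimations : List Int) (upper_bound : Int) : List Int × List Int :=
  let s := PySem.List.sorted estimations (fun x => x) false
  let vals := (PySem.List.dedup s).filter (fun m => decide (m ≤ upper_bound))
  (vals, vals.map (fun m => (PySem.List.bisectRight s m : Int)))

-- ===== PRECONDITION & SPEC =====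
def Spec_gen_guess_crack (estimations : List Int) (upper_bound : Int) (out : List Int × List Int) : Prop := out = gen_guess_crack_alt estimations upper_bound
instance (estimations : List Int) (upper_bound : Int) (out : List Int × List Int) : Decidable (Spec_gen_guess_crack estimations upper_bound out) := by unfold Spec_gen_guess_crack; infer_instance

-- ===== CLAIM (what is proved, stated in full; the proofs are below) =====
def Claim_equal_gen_guess_crack : Prop := ∀ (estimations : List Int) (upper_bound : Int), Dom_gen_guess_crack estimations upper_bound → Spec_gen_guess_crack estimations upper_bound (gen_guess_crack estimations upper_bound)

-- ===== LEMMAS AND PROOFS =====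

-- B's value list, as a function of the sorted list
def pvVals (ub : Int) (s : List Int) : List Int :=
  (PySem.List.dedup s).filter (fun m => decide (m ≤ ub))

-- last element of cs ++ [v] read the Python way
theorem pvGetD_last_append (cs : List Int) (v : Int) :
    PySem.List.pyGetD (cs ++ [v]) (-1) 0 = v := by
  simp [PySem.List.pyGetD, PySem.List.pyGet?, PySem.List.pyIdx?]

-- adding elements already present leaves a set unchanged
theorem foldl_add_of_mem (r : List Int) : ∀ s : PySem.Set Int,
    (∀ y ∈ r, s.contains y = true) → r.foldl PySem.Set.add s = s := by
  induction r with
  | nil => intro s _; rfl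
  | cons a r ih =>
      intro s h
      have ha : PySem.Set.add s a = s := by
        have hm : a ∈ s := by simpa using h a (by simp)
        simp [PySem.Set.add, hm]
      simpa [ha] using ih s (fun y hy => h y (by simp [hy]))

-- a leading element absent from the rest of the list stays in front of the dedup fold
theorem foldl_add_cons_front (t : List Int) : ∀ (x : Int) (s : List Int), x ∉ t →
    t.foldl PySem.Set.add ([x] ++ s) = [x] ++ t.foldl PySem.Set.add s := by
  induction t with
  | nil => intro x s _; rfl
  | cons a t ih =>
      intro x s hx
      have hax : a ≠ x := by
        simp only [List.mem_cons, not_or] at hx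
        exact Ne.symm hx.1
      have hmem : (([x] ++ s).contains a) = s.contains a := by
        simp [List.contains_eq_mem, hax]
      have : PySem.Set.add ([x] ++ s) a = [x] ++ PySem.Set.add s a := by
        by_cases hc : a ∈ s
        · simp [PySem.Set.add, PySem.Set.contains, hax, hc]
        · simp [PySem.Set.add, PySem.Set.contains, hax, hc]
      rw [List.foldl_cons, this, List.foldl_cons,
        ih x (PySem.Set.add s a) (by intro h; exact hx (by simp [h]))]

-- dedup of x :: (run of x) ++ t with x ∉ t
theorem dedup_run_cons (x : Int) (r t : List Int)
    (hr : ∀ y ∈ r, y = x) (hx : x ∉ t) :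
    PySem.List.dedup (x :: (r ++ t)) = x :: PySem.List.dedup t := by
  show (x :: (r ++ t)).foldl PySem.Set.add [] = x :: t.foldl PySem.Set.add []
  rw [List.foldl_cons, List.foldl_append]
  have h1 : PySem.Set.add [] x = [x] := rfl
  have h2 : r.foldl PySem.Set.add [x] = [x] := by
    apply foldl_add_of_mem
    intro y hy
    simp [PySem.Set.contains, hr y hy]
  rw [h1, h2]
  simpa using foldl_add_cons_front t x [] hx

-- counting "≤ m" is a bisect_right position in a sorted list
theorem countP_le_eq_bisectRight (s : List Int) (m : Int)
    (h : s.Pairwise (· ≤ ·)) :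
    s.countP (fun y => decide (y ≤ m)) = PySem.List.bisectRight s m := by
  obtain ⟨hk, hlo, hhi⟩ := PySem.List.bisectRight_spec s m h
  set k := PySem.List.bisectRight s m with hkdef
  rw [← List.take_append_drop k s, List.countP_append]
  have h1 : (s.take k).countP (fun y => decide (y ≤ m)) = k := by
    have : (s.take k).countP (fun y => decide (y ≤ m)) = (s.take k).length := by
      rw [List.countP_eq_length]
      intro a ha
      obtain ⟨j, hj, rfl⟩ := List.mem_iff_getElem.1 ha
      rw [List.getElem_take]
      have hjk : j < k := by
        have := hj; rw [List.length_take] at this; omega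
      exact decide_eq_true (hlo j (by have := hj; rw [List.length_take] at this; omega) hjk)
    rw [this, List.length_take, min_eq_left hk]
  have h2 : (s.drop k).countP (fun y => decide (y ≤ m)) = 0 := by
    rw [List.countP_eq_zero]
    intro a ha
    obtain ⟨j, hj, rfl⟩ := List.mem_iff_getElem.1 ha
    rw [List.getElem_drop]
    have hjk : k + j < s.length := by
      have := hj; rw [List.length_drop] at this; omega
    have := hhi (k + j) hjk (by omega)
    simp; omega
  omega

-- all elements after the leading run of a sorted list are strictly larger
theorem dropWhile_gt (x : Int) (xs : List Int)
    (h : (x :: xs).Pairwise (· ≤ ·)) :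
    ∀ y ∈ xs.dropWhile (fun y => y == x), x < y := by
  have hsub : (xs.dropWhile (fun y => y == x)).Pairwise (fun a b : Int => a ≤ b) :=
    (List.Pairwise.sublist (List.dropWhile_sublist _) h.of_cons)
  cases hdw : xs.dropWhile (fun y => y == x) with
  | nil => intro y hy; simp at hy
  | cons z t =>
      have hhead := List.head?_dropWhile_not (fun y => y == x) xs
      rw [hdw] at hhead
      simp at hhead
      have hzx : x < z := by
        have hz : z ∈ xs := by
          have hz1 : z ∈ xs.dropWhile (fun y => y == x) := by simp [hdw]
          exact (List.dropWhile_sublist _).mem hz1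
        have := (List.pairwise_cons.1 h).1 z hz
        omega
      intro y hy
      rcases List.mem_cons.1 hy with rfl | hyt
      · exact hzx
      · have := (List.pairwise_cons.1 (hdw ▸ hsub)).1 y hyt
        omega

-- the main loop invariant: A's fold over the runs appends B's values and counts
theorem fold_runs (ub : Int) : ∀ s : List Int, s.Pairwise (· ≤ ·) →
    ∀ (gs cs : List Int) (c : Int), PySem.List.pyGetD cs (-1) 0 = c →
    (pvRunsA s).foldl
      (fun (p : List Int × List Int) g =>
        if g.1 ≤ ub then
          (p.1 ++ [g.1], p.2 ++ [PySem.List.pyGetD p.2 (-1) 0 + (g.2.length : Int)])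
        else p)
      (gs, cs)
    = (gs ++ pvVals ub s,
       cs ++ (pvVals ub s).map (fun m => c + (s.countP (fun y => decide (y ≤ m)) : Int))) := by
  intro s
  induction s using pvRunsA.induct with
  | case1 => intro _ gs cs c _; simp [pvRunsA, pvVals, PySem.List.dedup, PySem.Set.ofList]
  | case2 x xs ih =>
      intro hp gs cs c hc
      set r := xs.takeWhile (fun y => y == x) with hrdef
      set t := xs.dropWhile (fun y => y == x) with htdef
      have hxs : r ++ t = xs := List.takeWhile_append_dropWhile
      have hr : ∀ y ∈ r, y = x := by
        intro y hy
        have := List.mem_takeWhile_imp hy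
        simpa using this
      have hgt : ∀ y ∈ t, x < y := dropWhile_gt x xs hp
      have hxnt : x ∉ t := fun h => absurd (hgt x h) (lt_irrefl x)
      have hpt : t.Pairwise (fun a b : Int => a ≤ b) :=
        List.Pairwise.sublist (List.dropWhile_sublist _) hp.of_cons
      have hded : PySem.List.dedup (x :: xs) = x :: PySem.List.dedup t := by
        rw [← hxs]; exact dedup_run_cons x r t hr hxnt
      rw [pvRunsA, List.foldl_cons]
      by_cases hub : x ≤ ub
      · simp only [hub, if_pos]
        rw [hc]
        rw [ih hpt (gs ++ [x]) (cs ++ [c + ((x :: r).length : Int)]) (c + ((x :: r).length : Int))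
              (pvGetD_last_append _ _)]
        have hvals : pvVals ub (x :: xs) = x :: pvVals ub t := by
          unfold pvVals; rw [hded, List.filter_cons]; simp [hub]
        rw [hvals]
        simp only [Prod.mk.injEq]
        refine ⟨by simp, ?_⟩
        rw [List.map_cons, List.append_assoc, List.singleton_append]
        congr 1
        congr 1
        · -- head count: c + |run| = c + countP (≤ x) over x::xs
          have hcx : (x :: xs).countP (fun y => decide (y ≤ x)) = (x :: r).length := by
            rw [← hxs, ← List.cons_append, List.countP_append]
            have h1 : (x :: r).countP (fun y => decide (y ≤ x)) = (x :: r).length := by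
              rw [List.countP_eq_length]
              intro a ha
              rcases List.mem_cons.1 ha with rfl | h
              · simp
              · simp [hr a h]
            have h2 : t.countP (fun y => decide (y ≤ x)) = 0 := by
              rw [List.countP_eq_zero]
              intro a ha
              have := hgt a ha
              simp; omega
            omega
          rw [hcx]
        · -- tail counts: shift the accumulator by the run length
          apply List.map_congr_left
          intro m hm
          have hmt : m ∈ t := by
            have : m ∈ pvVals ub t := hm
            simp [pvVals] at this
            exact this.1
          have hxm : x < m := hgt m hmt
          have : (x :: xs).countP (fun y => decide (y ≤ m))
              = (x :: r).length + t.countP (fun y => decide (y ≤ m)) := by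
            rw [← hxs, ← List.cons_append, List.countP_append]
            have h1 : (x :: r).countP (fun y => decide (y ≤ m)) = (x :: r).length := by
              rw [List.countP_eq_length]
              intro a ha
              rcases List.mem_cons.1 ha with rfl | h
              · simp; omega
              · have := hr a h; subst this; simp; omega
            omega
          rw [this]
          push_cast
          ring
      · simp only [hub, if_false]
        rw [ih hpt gs cs c hc]
        have hvals : pvVals ub (x :: xs) = pvVals ub t := by
          unfold pvVals; rw [hded, List.filter_cons]; simp [hub]
        have hvnil : pvVals ub t = [] := by
          simp only [pvVals, List.filter_eq_nil_iff]
          intro m hm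
          have hmt : m ∈ t := (PySem.List.mem_dedup _ _).1 hm
          have := hgt m hmt
          simp; omega
        rw [hvals, hvnil]
        simp

-- ===== VERDICT (by name: the statement is the Claim_ definition above) =====
theorem gen_guess_crack_spec : Claim_equal_gen_guess_crack := by
  intro estimations ub _
  unfold Spec_gen_guess_crack gen_guess_crack gen_guess_crack_alt
  dsimp only
  set s := PySem.List.sorted estimations (fun x => x) false with hs
  have hp : s.Pairwise (fun a b : Int => a ≤ b) :=
    PySem.List.sorted_pairwise estimations (fun x => x)
  rw [fold_runs ub s hp [0] [0] 0 (by decide)]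
  simp only [Prod.mk.injEq, List.singleton_append, List.drop_one, List.tail_cons]
  refine ⟨rfl, ?_⟩
  apply List.map_congr_left
  intro m _
  rw [countP_le_eq_bisectRight s m hp]
  simp
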